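-- pv_equiv track=rewrite | github.com/x-s-g/Vuln-Intro | Vuln-Intro/Data_Crawling/patch_list.py | filter_patch
-- ===== SOURCE A (Python) =====
-- def filter_patch(file_path, link):
--     link_list = []
--     flag = False
--     for path in file_path:
--         if link in path:
--             flag = True
--         if flag:
--             link_list.append(path)
--     return link_list
-- ===== SOURCE B (Python) =====
-- def filter_patch(file_path, link):
--     i = next((idx for idx, p in enumerate(file_path) if link in p), None)
--     if i is None:
--         return []
--     return list(file_path[i:])
-- ===== Notes on version B (the rewrite author's own statement) =====
-- stated objective: simpler
-- what changed: Replaces the sticky-flag accumulation loop with locate-the-first-match (enumerate/next) then a single slice of the suffix.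
import Mathlib
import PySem

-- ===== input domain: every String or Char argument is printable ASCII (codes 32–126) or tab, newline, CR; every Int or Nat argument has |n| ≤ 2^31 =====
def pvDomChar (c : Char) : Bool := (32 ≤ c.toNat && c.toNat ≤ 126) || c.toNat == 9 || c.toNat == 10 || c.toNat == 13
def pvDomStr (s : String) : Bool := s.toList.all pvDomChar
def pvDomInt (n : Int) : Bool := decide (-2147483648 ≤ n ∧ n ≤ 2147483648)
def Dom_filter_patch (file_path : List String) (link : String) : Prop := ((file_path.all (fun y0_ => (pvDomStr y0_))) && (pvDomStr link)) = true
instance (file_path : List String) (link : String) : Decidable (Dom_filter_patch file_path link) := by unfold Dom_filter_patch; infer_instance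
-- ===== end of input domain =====

-- B replaces A's sticky-flag accumulation loop with locate-the-first-match then slice (simpler decomposition).


-- ===== PORT A =====
-- loop state: (flag, link_list); 'link in path' is PySem.Str.isIn
def fpStep (link : String) (st : Bool × List String) (path : String) : Bool × List String :=
  let flag := if PySem.Str.isIn link path then true else st.1
  (flag, if flag then st.2 ++ [path] else st.2)

def filter_patch (file_path : List String) (link : String) : List String :=
  (file_path.foldl (fpStep link) (false, [])).2

-- ===== PORT B =====
-- i = next((idx for idx, p in enumerate(file_path) if link in p), None) is findIdx?;
-- file_path[i:] with 0 ≤ i ≤ len is exactly List.drop i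
def filter_patch_alt (file_path : List String) (link : String) : List String :=
  match file_path.findIdx? (fun p => PySem.Str.isIn link p) with
  | none => []
  | some i => file_path.drop i

-- ===== PRECONDITION & SPEC =====
def Spec_filter_patch (file_path : List String) (link : String) (out : List String) : Prop := out = filter_patch_alt file_path link
instance (file_path : List String) (link : String) (out : List String) : Decidable (Spec_filter_patch file_path link out) := by unfold Spec_filter_patch; infer_instance

-- ===== CLAIM (what is proved, stated in full; the proofs are below) =====
def Claim_equal_filter_patch : Prop := ∀ (file_path : List String) (link : String), Dom_filter_patch file_path link → Spec_filter_patch file_path link (filter_patch file_path link)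

-- ===== LEMMAS AND PROOFS =====
-- once the flag is true, the loop appends every remaining element
theorem fpStep_true (link x : String) (acc : List String) :
    fpStep link (true, acc) x = (true, acc ++ [x]) := by
  simp [fpStep]

theorem fp_loop_true (link : String) (l : List String) (acc : List String) :
    (l.foldl (fpStep link) (true, acc)).2 = acc ++ l := by
  induction l generalizing acc with
  | nil => simp
  | cons x xs ih => rw [List.foldl_cons, fpStep_true, ih]; simp

-- from a false flag, the loop yields acc ++ (suffix from the first match)
theorem fp_loop_false (link : String) (l : List String) (acc : List String) :
    (l.foldl (fpStep link) (false, acc)).2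
    = acc ++ (match l.findIdx? (fun p => PySem.Str.isIn link p) with
              | none => []
              | some i => l.drop i) := by
  induction l generalizing acc with
  | nil => simp
  | cons x xs ih =>
    by_cases h : PySem.Chars.isIn link.toList x.toList
    · have hs : fpStep link (false, acc) x = (true, acc ++ [x]) := by simp [fpStep, PySem.Str.isIn, h]
      rw [List.foldl_cons, hs, fp_loop_true, List.findIdx?_cons]
      simp [h]
    · have hs : fpStep link (false, acc) x = (false, acc) := by simp [fpStep, PySem.Str.isIn, h]
      rw [List.foldl_cons, hs, ih, List.findIdx?_cons]
      cases hfi : xs.findIdx? (fun p => PySem.Str.isIn link p) <;> simp [h, hfi]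

-- ===== VERDICT (by name: the statement is the Claim_ definition above) =====
theorem filter_patch_spec : Claim_equal_filter_patch := by
  intro file_path link _
  unfold Spec_filter_patch filter_patch filter_patch_alt
  simpa using fp_loop_false link file_path []
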